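-- pv_equiv track=rewrite | github.com/codingBear01/TIL | algorithms/baekjoon/python/algorithms_basic/data_structures/10799_쇠막대기.py | answer3
-- ===== SOURCE A (Python) =====
-- def answer3(data):
--     tmp = data
--     pipe = tmp.replace("()", "*")
--     stack = []
--     result = 0
--
--     for p in pipe:
--         if p == "(":
--             stack.append(p)
--         elif p == ")":
--             stack.pop()
--             result += 1
--         else:
--             result += len(stack)
--
--     return result
-- ===== SOURCE B (Python) =====
-- def answer3(data):
--     # Single pass over the original string with a depth counter (no stack list,
--     # no replace() preprocessing); remembers the previous character to tell a
--     # laser "()" from a bar end ")".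
--     depth = 0
--     result = 0
--     prev = ''
--     for c in data:
--         if c == '(':
--             depth += 1
--         elif c == ')':
--             depth -= 1
--             result += depth if prev == '(' else 1
--         else:
--             result += depth
--         prev = c
--     return result
-- ===== Notes on version B (the rewrite author's own statement) =====
-- stated objective: idiomatic
-- what changed: B drops A's replace("()","*") preprocessing pass and the stack list entirely, doing a single pass over the original string with an integer depth counter and the previous character to distinguish lasers from bar ends.
import Mathlib
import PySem

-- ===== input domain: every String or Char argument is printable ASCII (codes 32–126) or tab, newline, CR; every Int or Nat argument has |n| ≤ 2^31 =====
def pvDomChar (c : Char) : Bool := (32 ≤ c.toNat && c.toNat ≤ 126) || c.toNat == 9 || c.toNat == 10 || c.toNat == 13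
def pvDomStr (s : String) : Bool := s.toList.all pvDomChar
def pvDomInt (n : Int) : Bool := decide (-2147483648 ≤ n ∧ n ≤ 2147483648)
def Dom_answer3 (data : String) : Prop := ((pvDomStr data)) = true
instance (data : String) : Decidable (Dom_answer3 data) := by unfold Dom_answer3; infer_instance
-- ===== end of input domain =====

-- B replaces A's replace("()","*") preprocessing + stack list by one pass with a depth
-- counter and the previous character; same return value on every input where A returns.

-- ===== PORT A =====
-- one loop step of A; `none` = the IndexError of stack.pop() on an empty stack
def stepA (st : Option (List Char × Int)) (p : Char) : Option (List Char × Int) :=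
  match st with
  | none => none
  | some (stack, result) =>
    if p = '(' then some (p :: stack, result)
    else if p = ')' then
      match stack with
      | [] => none
      | _ :: rest => some (rest, result + 1)
    else some (stack, result + (stack.length : Int))

def answer3 (data : String) : Int :=
  -- tmp = data and pipe = tmp.replace("()", "*") are inlined
  match (PySem.Str.replace data "()" "*").toList.foldl stepA (some ([], 0)) with
  | some (_, r) => r
  | none => 0   -- unreachable under Pre_answer3 (A raises IndexError there)

-- ===== PORT B =====
-- state (depth, result, prev); Python's initial prev = '' is only ever compared with
-- '(', so the port uses ' ' for it (exact on the admitted inputs)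
def stepB (st : Int × Int × Char) (c : Char) : Int × Int × Char :=
  if c = '(' then (st.1 + 1, st.2.1, c)
  else if c = ')' then
    (st.1 - 1, (if st.2.2 = '(' then st.2.1 + (st.1 - 1) else st.2.1 + 1), c)
  else (st.1, st.2.1 + st.1, c)

def answer3_alt (data : String) : Int :=
  (data.toList.foldl stepB (0, 0, ' ')).2.1

-- ===== PRECONDITION & SPEC =====
-- Pre_ excludes exactly the unbalanced strings on which A's stack.pop() raises
-- IndexError: every ')' must be preceded by strictly more '(' than ')'.
def Pre_answer3 (data : String) : Prop :=
  ∀ i, i < data.toList.length → data.toList[i]? = some ')' →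
    (data.toList.take i).count ')' < (data.toList.take i).count '('
instance (data : String) : Decidable (Pre_answer3 data) := by unfold Pre_answer3; infer_instance
def pvWitness_answer3 : String := "(()()*a)"
def Spec_answer3 (data : String) (out : Int) : Prop := out = answer3_alt data
instance (data : String) (out : Int) : Decidable (Spec_answer3 data out) := by unfold Spec_answer3; infer_instance

-- ===== CLAIM (what is proved, stated in full; the proofs are below) =====
def Claim_equal_answer3 : Prop := ∀ (data : String), Dom_answer3 data → Pre_answer3 data → Spec_answer3 data (answer3 data)

-- ===== LEMMAS AND PROOFS =====

-- recursion view of Python's  s.replace("()", "*")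
def replPairs : List Char → List Char
  | [] => []
  | [c] => [c]
  | c :: d :: t =>
    if c = '(' ∧ d = ')' then '*' :: replPairs t else c :: replPairs (d :: t)

theorem replPairs_pair (t : List Char) : replPairs ('(' :: ')' :: t) = '*' :: replPairs t := by
  simp [replPairs]

theorem replPairs_cons (c : Char) (t : List Char)
    (h : ¬ (c = '(' ∧ t.head? = some ')')) :
    replPairs (c :: t) = c :: replPairs t := by
  match t with
  | [] => rfl
  | d :: t' =>
    simp only [List.head?] at h
    rw [replPairs, if_neg (by simpa using h)]

theorem go_eq (fuel : Nat) (l acc : List Char) (h : l.length ≤ fuel) :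
    PySem.Chars.replace.go ['(', ')'] ['*'] fuel l acc = acc.reverse ++ replPairs l := by
  induction fuel generalizing l acc with
  | zero =>
    have : l = [] := List.eq_nil_of_length_eq_zero (Nat.le_zero.mp h)
    subst this; simp [PySem.Chars.replace.go, replPairs]
  | succ n ih =>
    match l with
    | [] => simp [PySem.Chars.replace.go, replPairs]
    | c :: t =>
      rw [PySem.Chars.replace.go]
      by_cases hp : List.isPrefixOf ['(', ')'] (c :: t) = true
      · rw [if_pos hp]
        match t with
        | [] => simp [List.isPrefixOf] at hp
        | d :: t' =>
          simp at hp
          obtain ⟨hc, hd⟩ := hp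
          subst hc
          subst hd
          simp only [List.length_cons] at h
          rw [show List.drop (List.length ['(', ')']) ('(' :: ')' :: t') = t' by simp]
          rw [ih t' _ (by omega), replPairs_pair]
          simp
      · rw [if_neg hp]
        rw [ih t (c :: acc) (by simp at h; omega)]
        rw [replPairs_cons]
        · simp
        · rintro ⟨rfl, hh⟩
          match t with
          | [] => simp at hh
          | d :: t' =>
            have : d = ')' := by simpa [List.head?] using hh
            subst this
            simp [List.isPrefixOf] at hp

theorem replace_eq (data : String) :
    (PySem.Str.replace data "()" "*").toList = replPairs data.toList := by
  rw [PySem.Str.replace]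
  rw [show ("()" : String).toList = ['(', ')'] from rfl,
      show ("*" : String).toList = ['*'] from rfl]
  rw [PySem.Chars.replace, if_neg (by simp)]
  simpa using go_eq data.toList.length data.toList [] le_rfl

theorem foldA_none (l : List Char) : l.foldl stepA none = none := by
  induction l with
  | nil => rfl
  | cons c t ih => simpa [stepA] using ih

-- balance invariant: with d extra open brackets available, no ')' pops an empty stack
def Bal : Nat → List Char → Prop
  | _, [] => True
  | d, c :: t =>
    (c = ')' → 0 < d) ∧ Bal (if c = '(' then d + 1 else if c = ')' then d - 1 else d) t

theorem pre_to_bal (l : List Char) (d : Nat)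
    (h : ∀ i, i < l.length → l[i]? = some ')' →
      (l.take i).count ')' < (l.take i).count '(' + d) : Bal d l := by
  induction l generalizing d with
  | nil => trivial
  | cons c t ih =>
    refine ⟨fun hc => by simpa [hc] using h 0 (by simp) (by simp [hc]), ?_⟩
    split_ifs with h1 h2
    · refine ih _ fun i hi hr => ?_
      have := h (i + 1) (by simpa using Nat.succ_lt_succ hi) (by simpa using hr)
      simp only [List.take_succ_cons, List.count_cons, h1] at this
      simp at this
      omega
    · have hd : 0 < d := by simpa [h2] using h 0 (by simp) (by simp [h2])
      refine ih _ fun i hi hr => ?_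
      have := h (i + 1) (by simpa using Nat.succ_lt_succ hi) (by simpa using hr)
      simp only [List.take_succ_cons, List.count_cons] at this
      simp [h2] at this
      omega
    · refine ih _ fun i hi hr => ?_
      have := h (i + 1) (by simpa using Nat.succ_lt_succ hi) (by simpa using hr)
      simp only [List.take_succ_cons, List.count_cons] at this
      simp [h1, h2] at this
      omega

theorem foldA_total (n : Nat) : ∀ l : List Char, l.length ≤ n →
    ∀ (stack : List Char) (res : Int), Bal stack.length l →
    ∃ st' r', (replPairs l).foldl stepA (some (stack, res)) = some (st', r') := by
  induction n with
  | zero =>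
    intro l hl stack res _
    have : l = [] := List.eq_nil_of_length_eq_zero (Nat.le_zero.mp hl)
    subst this; exact ⟨stack, res, rfl⟩
  | succ n ih =>
    intro l hl stack res hb
    cases l with
    | nil => exact ⟨stack, res, rfl⟩
    | cons c t =>
      by_cases hpair : c = '(' ∧ t.head? = some ')'
      · obtain ⟨rfl, hh⟩ := hpair
        match t with
        | [] => simp at hh
        | d :: t' =>
          have : d = ')' := by simpa [List.head?] using hh
          subst this
          have hb2 : Bal stack.length t' := by
            have := hb.2
            simp at this
            simpa using this.2
          rw [replPairs_pair]
          simp only [List.foldl_cons]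
          rw [show stepA (some (stack, res)) '*' = some (stack, res + stack.length) by
            simp [stepA]]
          exact ih t' (by simp at hl; omega) stack _ hb2
      · rw [replPairs_cons c t hpair]
        simp only [List.foldl_cons]
        by_cases h1 : c = '('
        · subst h1
          rw [show stepA (some (stack, res)) '(' = some ('(' :: stack, res) by simp [stepA]]
          refine ih t (by simp at hl; omega) ('(' :: stack) res ?_
          simpa using hb.2
        · by_cases h2 : c = ')'
          · subst h2
            have hd : 0 < stack.length := hb.1 rfl
            match stack with
            | s :: rest =>
              rw [show stepA (some (s :: rest, res)) ')' = some (rest, res + 1) by simp [stepA]]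
              refine ih t (by simp at hl; omega) rest (res + 1) ?_
              have := hb.2
              simp at this
              simpa using this
          · rw [show stepA (some (stack, res)) c = some (stack, res + stack.length) by
              simp [stepA, h1, h2]]
            refine ih t (by simp at hl; omega) stack _ ?_
            have := hb.2
            simpa [h1, h2] using this

theorem main_lemma (n : Nat) : ∀ l : List Char, l.length ≤ n →
    ∀ (stack : List Char) (res : Int) (prev : Char),
    (prev = '(' → l.head? ≠ some ')') →
    ∀ st' r', (replPairs l).foldl stepA (some (stack, res)) = some (st', r') →
    (l.foldl stepB ((stack.length : Int), res, prev)).1 = (st'.length : Int) ∧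
    (l.foldl stepB ((stack.length : Int), res, prev)).2.1 = r' := by
  induction n with
  | zero =>
    intro l hl stack res prev _ st' r' hA
    have : l = [] := List.eq_nil_of_length_eq_zero (Nat.le_zero.mp hl)
    subst this
    simp only [replPairs, List.foldl_nil] at hA ⊢
    obtain ⟨h1, h2⟩ : stack = st' ∧ res = r' := by
      have := Option.some.inj hA; exact ⟨congrArg Prod.fst this, congrArg Prod.snd this⟩
    simp [h1, h2]
  | succ n ih =>
    intro l hl stack res prev hprev st' r' hA
    cases l with
    | nil =>
      simp only [replPairs, List.foldl_nil] at hA ⊢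
      obtain ⟨h1, h2⟩ : stack = st' ∧ res = r' := by
        have := Option.some.inj hA; exact ⟨congrArg Prod.fst this, congrArg Prod.snd this⟩
      simp [h1, h2]
    | cons c t =>
      by_cases hpair : c = '(' ∧ t.head? = some ')'
      · obtain ⟨rfl, hh⟩ := hpair
        match t with
        | [] => simp at hh
        | d :: t' =>
          have : d = ')' := by simpa [List.head?] using hh
          subst this
          rw [replPairs_pair] at hA
          simp only [List.foldl_cons] at hA ⊢
          rw [show stepA (some (stack, res)) '*' = some (stack, res + stack.length) by
            simp [stepA]] at hA
          rw [show stepB ((stack.length : Int), res, prev) '(' =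
              ((stack.length : Int) + 1, res, '(') by simp [stepB]]
          rw [show stepB ((stack.length : Int) + 1, res, '(') ')' =
              ((stack.length : Int), res + stack.length, ')') by simp [stepB]]
          exact ih t' (by simp at hl; omega) stack (res + stack.length) ')'
            (by intro h; simp at h) st' r' hA
      · rw [replPairs_cons c t hpair] at hA
        simp only [List.foldl_cons] at hA ⊢
        by_cases h1 : c = '('
        · subst h1
          rw [show stepA (some (stack, res)) '(' = some ('(' :: stack, res) by simp [stepA]] at hA
          rw [show stepB ((stack.length : Int), res, prev) '(' =
              ((stack.length : Int) + 1, res, '(') by simp [stepB]]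
          have hcond : ('(' : Char) = '(' → t.head? ≠ some ')' :=
            fun _ hh => hpair ⟨rfl, hh⟩
          have := ih t (by simp at hl; omega) ('(' :: stack) res '(' hcond st' r' hA
          simpa using this
        · by_cases h2 : c = ')'
          · subst h2
            have hpne : prev ≠ '(' := fun hp => hprev hp (by simp)
            match stack with
            | [] =>
              rw [show stepA (some (([] : List Char), res)) ')' = none by simp [stepA]] at hA
              rw [foldA_none] at hA
              exact absurd hA (by simp)
            | s :: rest =>
              rw [show stepA (some (s :: rest, res)) ')' = some (rest, res + 1) by simp [stepA]] at hA
              rw [show stepB (((s :: rest).length : Int), res, prev) ')' =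
                  ((rest.length : Int), res + 1, ')') by
                simp [stepB, hpne]]
              exact ih t (by simp at hl; omega) rest (res + 1) ')'
                (by intro h; simp at h) st' r' hA
          · rw [show stepA (some (stack, res)) c = some (stack, res + stack.length) by
              simp [stepA, h1, h2]] at hA
            rw [show stepB ((stack.length : Int), res, prev) c =
                ((stack.length : Int), res + stack.length, c) by simp [stepB, h1, h2]]
            exact ih t (by simp at hl; omega) stack (res + stack.length) c
              (fun hc => absurd hc h1) st' r' hA

-- ===== VERDICT (by name: the statement is the Claim_ definition above) =====
theorem answer3_spec : Claim_equal_answer3 := by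
  intro data _ hpre
  unfold Spec_answer3 answer3 answer3_alt
  rw [replace_eq]
  have hbal : Bal 0 data.toList := by
    refine pre_to_bal data.toList 0 fun i hi hr => ?_
    have := hpre i hi hr
    omega
  obtain ⟨st', r', hA⟩ :=
    foldA_total data.toList.length data.toList le_rfl [] 0 (by simpa using hbal)
  have hmain := main_lemma data.toList.length data.toList le_rfl [] 0 ' '
    (by intro h; simp at h) st' r' hA
  simp only [List.length_nil, Nat.cast_zero] at hA hmain
  rw [hA, hmain.2]
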